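-- pv_equiv track=rewrite | github.com/pypi-data/pypi-mirror-346 | packages/testgenie-py/testgenie_py-0.3.7-py3-none-any.whl/testgen/generator/doctest_generator.py | _extract_doctest_examples
-- ===== SOURCE A (Python) =====
-- from typing import Optional, List, Set, Tuple
--
-- def _extract_doctest_examples(docstring_lines: List[str]) -> List[Tuple[str, str]]:
--     examples = []
--     current_call = None
--     current_result_lines = []
--
--     # Process docstring line by line
--     for line in docstring_lines:
--         stripped_line = line.strip()
--
--         # Check if this is a test call line (starts with >>>)
--         if stripped_line.startswith('>>>'):
--             # If we were already collecting a test, save it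
--             if current_call is not None:
--                 result = '\n'.join([line.strip() for line in current_result_lines if line.strip()])
--                 examples.append((current_call, result))
--                 current_result_lines = []
--
--             # Extract the call part (everything after >>>)
--             current_call = stripped_line[3:].strip()
--
--         # Otherwise, if we have a current call, add to the result
--         elif current_call is not None:
--             current_result_lines.append(stripped_line)
--
--     # Don't forget the last example if there is one
--     if current_call is not None and current_result_lines:
--         result = '\n'.join([line.strip() for line in current_result_lines if line.strip()])
--         examples.append((current_call, result))
--
--     return examples
-- ===== SOURCE B (Python) =====
-- def _extract_doctest_examples(docstring_lines):
--     stripped = [l.strip() for l in docstring_lines]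
--
--     def is_call(s):
--         return s.startswith('>>>')
--
--     def segments(lines):
--         # lines is empty or starts with a '>>>' call line
--         if not lines:
--             return []
--         call = lines[0][3:].strip()
--         body, rest = [], []
--         for j in range(1, len(lines)):
--             if is_call(lines[j]):
--                 rest = lines[j:]
--                 break
--             body.append(lines[j])
--         if not rest and not body:
--             return []
--         result = '\n'.join(s for s in body if s)
--         return [(call, result)] + segments(rest)
--
--     # drop the preamble before the first call line
--     i = 0
--     while i < len(stripped) and not is_call(stripped[i]):
--         i += 1
--     return segments(stripped[i:])
-- ===== Notes on version B (the rewrite author's own statement) =====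
-- stated objective: alternative
-- what changed: A's single stateful scan with current_call/current_result_lines accumulators and a trailing flush is replaced by a recursive segment decomposition: strip all lines once, drop the preamble before the first '>>>' line, then peel off one (call, body) segment per recursion step, emitting the last segment only when lines follow its call.
import Mathlib
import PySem

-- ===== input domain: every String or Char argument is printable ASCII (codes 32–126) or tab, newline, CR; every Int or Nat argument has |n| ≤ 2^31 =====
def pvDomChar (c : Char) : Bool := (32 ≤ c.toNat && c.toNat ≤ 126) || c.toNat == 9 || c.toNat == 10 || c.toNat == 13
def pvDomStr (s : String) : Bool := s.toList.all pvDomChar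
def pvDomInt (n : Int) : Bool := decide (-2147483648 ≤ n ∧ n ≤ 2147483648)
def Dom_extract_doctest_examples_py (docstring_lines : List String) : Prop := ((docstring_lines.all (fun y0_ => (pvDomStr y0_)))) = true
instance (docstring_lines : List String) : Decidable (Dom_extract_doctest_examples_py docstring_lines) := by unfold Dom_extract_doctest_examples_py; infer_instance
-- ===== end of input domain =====

-- B replaces A's single stateful scan (current_call / current_result_lines accumulators with a
-- trailing flush) by a recursive segment decomposition: strip all lines once, drop the preamble
-- before the first '>>>' line, then peel off one (call, body) segment per recursion step.
-- Objective: alternative decomposition; same asymptotic cost.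

-- ===== PORT A =====
-- '\n'.join([line.strip() for line in current_result_lines if line.strip()])
def aFlushJoin (res : List String) : String :=
  PySem.Str.join "\n" ((res.filter (fun l => PySem.Str.strip l != "")).map PySem.Str.strip)

-- one iteration of A's for-loop; state = (examples, current_call, current_result_lines)
def aStep (st : List (String × String) × Option String × List String) (line : String) :
    List (String × String) × Option String × List String :=
  let stripped := PySem.Str.strip line
  if PySem.Str.startswith stripped ">>>" then
    match st with
    | (ex, some c, res) =>
        (ex ++ [(c, aFlushJoin res)],
         some (PySem.Str.strip (PySem.Str.slice stripped (some 3) none)), [])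
    | (ex, none, res) =>
        (ex, some (PySem.Str.strip (PySem.Str.slice stripped (some 3) none)), res)
  else
    match st with
    | (ex, some c, res) => (ex, some c, res ++ [stripped])
    | (ex, none, res) => (ex, none, res)

-- A's trailing 'if current_call is not None and current_result_lines'
def aFinish (st : List (String × String) × Option String × List String) :
    List (String × String) :=
  match st with
  | (ex, some c, res) => if res ≠ [] then ex ++ [(c, aFlushJoin res)] else ex
  | (ex, none, _) => ex

def extract_doctest_examples_py (docstring_lines : List String) : List (String × String) :=
  aFinish (docstring_lines.foldl aStep ([], none, []))

-- ===== PORT B =====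
def bIsCall (s : String) : Bool := PySem.Str.startswith s ">>>"

-- Source B's 'segments': input is empty or starts with a call line; peel one segment per step
def bSegments : List String → List (String × String)
  | [] => []
  | s :: rest =>
    let call := PySem.Str.strip (PySem.Str.slice s (some 3) none)
    let body := rest.takeWhile (fun t => !bIsCall t)
    let rest' := rest.dropWhile (fun t => !bIsCall t)
    if rest' = [] ∧ body = [] then []
    else (call, PySem.Str.join "\n" (body.filter (fun t => t != ""))) :: bSegments rest'
  termination_by l => l.length
  decreasing_by
    simp only [List.length_cons]
    exact Nat.lt_succ_of_le (List.length_dropWhile_le _ _)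

def extract_doctest_examples_py_alt (docstring_lines : List String) : List (String × String) :=
  let stripped := docstring_lines.map PySem.Str.strip
  bSegments (stripped.dropWhile (fun s => !bIsCall s))

-- ===== PRECONDITION & SPEC =====
def Spec_extract_doctest_examples_py (docstring_lines : List String) (out : List (String × String)) : Prop := out = extract_doctest_examples_py_alt docstring_lines
instance (docstring_lines : List String) (out : List (String × String)) : Decidable (Spec_extract_doctest_examples_py docstring_lines out) := by unfold Spec_extract_doctest_examples_py; infer_instance

-- ===== CLAIM (what is proved, stated in full; the proofs are below) =====
def Claim_equal_extract_doctest_examples_py : Prop := ∀ (docstring_lines : List String), Dom_extract_doctest_examples_py docstring_lines → Spec_extract_doctest_examples_py docstring_lines (extract_doctest_examples_py docstring_lines)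

-- ===== LEMMAS AND PROOFS =====

-- 'this raw line is not a call line'
def pNC (l : String) : Bool := !bIsCall (PySem.Str.strip l)

theorem strip_idem (s : String) : PySem.Str.strip (PySem.Str.strip s) = PySem.Str.strip s := by
  simp only [PySem.Str.strip, PySem.Chars.strip, PySem.Chars.lstrip, PySem.Chars.rstrip,
    String.toList_ofList]
  set p := PySem.Chars.isspace
  set L := s.toList
  set A := L.dropWhile p with hA
  have hAd : A.dropWhile p = A := by rw [hA]; exact List.dropWhile_idempotent ..
  set B := (A.reverse.dropWhile p).reverse with hB
  have hpre : B <+: A := by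
    have := List.rdropWhile_prefix (p := p) (l := A)
    simpa [List.rdropWhile, hB] using this
  have hBd : B.dropWhile p = B := by
    rw [List.dropWhile_eq_self_iff]
    intro hl
    have hlen : 0 < A.length := lt_of_lt_of_le hl hpre.length_le
    have h0 : B[0]'hl = A[0]'hlen := List.IsPrefix.getElem hpre hl
    rw [h0]
    exact (List.dropWhile_eq_self_iff).mp hAd hlen
  rw [hBd]
  have h2 : B.reverse.dropWhile p = B.reverse := by
    rw [hB, List.reverse_reverse]
    exact List.dropWhile_idempotent ..
  rw [h2, List.reverse_reverse]

theorem flush_eq_bjoin (L : List String) :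
    aFlushJoin (L.map PySem.Str.strip) =
      PySem.Str.join "\n" ((L.map PySem.Str.strip).filter (fun t => t != "")) := by
  unfold aFlushJoin
  congr 1
  induction L with
  | nil => rfl
  | cons x xs ih =>
    have h0 : PySem.Str.strip "" = "" := by decide
    by_cases h : PySem.Str.strip x = "" <;>
      simp [List.filter_cons, strip_idem, h, h0, ih]

theorem aStep_noncall (line : String) (ex : List (String × String))
    (cur : Option String) (res : List String)
    (h : bIsCall (PySem.Str.strip line) = false) :
    aStep (ex, cur, res) line =
      match cur with
      | some c => (ex, some c, res ++ [PySem.Str.strip line])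
      | none => (ex, none, res) := by
  cases cur <;> simp [aStep, bIsCall] at h ⊢ <;> simp [h]

theorem aStep_call (line : String) (ex : List (String × String))
    (cur : Option String) (res : List String)
    (h : bIsCall (PySem.Str.strip line) = true) :
    aStep (ex, cur, res) line =
      match cur with
      | some c => (ex ++ [(c, aFlushJoin res)],
          some (PySem.Str.strip (PySem.Str.slice (PySem.Str.strip line) (some 3) none)), [])
      | none => (ex,
          some (PySem.Str.strip (PySem.Str.slice (PySem.Str.strip line) (some 3) none)), res) := by
  cases cur <;> simp [aStep, bIsCall] at h ⊢ <;> simp [h]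

theorem skipFold (lines : List String) (ex : List (String × String)) (res : List String) :
    List.foldl aStep (ex, none, res) lines =
      List.foldl aStep (ex, none, res) (lines.dropWhile pNC) := by
  induction lines with
  | nil => rfl
  | cons l ls ih =>
    by_cases h : pNC l
    · rw [List.dropWhile_cons_of_pos h]
      have hl : bIsCall (PySem.Str.strip l) = false := by
        simpa [pNC] using h
      rw [List.foldl_cons, aStep_noncall _ _ _ _ hl]
      exact ih
    · rw [List.dropWhile_cons_of_neg h]

theorem bodyFold (body : List String)
    (h : ∀ l ∈ body, pNC l = true) :
    ∀ (ex : List (String × String)) (c : String) (res : List String),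
      List.foldl aStep (ex, some c, res) body = (ex, some c, res ++ body.map PySem.Str.strip) := by
  induction body with
  | nil => intro ex c res; simp
  | cons l ls ih =>
    intro ex c res
    have hl : bIsCall (PySem.Str.strip l) = false := by
      have := h l (List.mem_cons_self ..)
      simpa [pNC] using this
    rw [List.foldl_cons, aStep_noncall _ _ _ _ hl]
    rw [ih (fun x hx => h x (List.mem_cons_of_mem _ hx))]
    simp

-- bSegments on a stripped cons, expressed over the raw tail
theorem bSeg_cons (r : String) (tail : List String) :
    bSegments ((r :: tail).map PySem.Str.strip) =
      (if tail.dropWhile pNC = [] ∧ tail.takeWhile pNC = [] then []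
       else (PySem.Str.strip (PySem.Str.slice (PySem.Str.strip r) (some 3) none),
             aFlushJoin ((tail.takeWhile pNC).map PySem.Str.strip)) ::
            bSegments ((tail.dropWhile pNC).map PySem.Str.strip)) := by
  rw [List.map_cons, bSegments]
  have ht : (tail.map PySem.Str.strip).takeWhile (fun t => !bIsCall t) =
      (tail.takeWhile pNC).map PySem.Str.strip := by
    rw [List.takeWhile_map]; rfl
  have hd : (tail.map PySem.Str.strip).dropWhile (fun t => !bIsCall t) =
      (tail.dropWhile pNC).map PySem.Str.strip := by
    rw [List.dropWhile_map]; rfl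
  simp only [ht, hd, List.map_eq_nil_iff, flush_eq_bjoin]

theorem mainFold : ∀ (n : Nat) (lines : List String), lines.length ≤ n →
    ∀ (ex : List (String × String)) (c : String),
      aFinish (List.foldl aStep (ex, some c, []) lines) =
        ex ++ (if lines.dropWhile pNC = [] ∧ lines.takeWhile pNC = [] then []
               else (c, aFlushJoin ((lines.takeWhile pNC).map PySem.Str.strip)) ::
                    bSegments ((lines.dropWhile pNC).map PySem.Str.strip)) := by
  intro n
  induction n with
  | zero =>
    intro lines hlen ex c
    have : lines = [] := List.eq_nil_of_length_eq_zero (Nat.le_zero.mp hlen)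
    subst this
    simp [aFinish]
  | succ n ih =>
    intro lines hlen ex c
    have hsplit : lines = lines.takeWhile pNC ++ lines.dropWhile pNC :=
      (List.takeWhile_append_dropWhile ..).symm
    have hbody : ∀ l ∈ lines.takeWhile pNC, pNC l = true :=
      fun l hl => List.mem_takeWhile_imp hl
    conv_lhs => rw [hsplit]
    rw [List.foldl_append, bodyFold _ hbody]
    cases hdw : lines.dropWhile pNC with
    | nil =>
      by_cases hb : lines.takeWhile pNC = []
      · simp [aFinish, hb]
      · have hne : (lines.takeWhile pNC).map PySem.Str.strip ≠ [] := by
          simpa [List.map_eq_nil_iff] using hb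
        simp [aFinish, hb, hne, bSegments]
    | cons r tail =>
      have hr : pNC r = false := by
        have := List.head_dropWhile_not (p := pNC) (l := lines) (by rw [hdw]; simp)
        simpa [hdw] using this
      have hrc : bIsCall (PySem.Str.strip r) = true := by
        simpa [pNC] using hr
      rw [List.foldl_cons, aStep_call _ _ _ _ hrc]
      have htl : tail.length ≤ n := by
        have h1 : (lines.dropWhile pNC).length ≤ lines.length := List.length_dropWhile_le ..
        rw [hdw] at h1
        simp only [List.length_cons] at h1
        omega
      rw [ih tail htl, bSeg_cons]
      simp

theorem extract_doctest_examples_py_spec : Claim_equal_extract_doctest_examples_py := by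
  intro lines _
  unfold Spec_extract_doctest_examples_py extract_doctest_examples_py extract_doctest_examples_py_alt
  have hdwmap : (lines.map PySem.Str.strip).dropWhile (fun s => !bIsCall s) =
      (lines.dropWhile pNC).map PySem.Str.strip := by
    rw [List.dropWhile_map]; rfl
  rw [skipFold]
  cases hdw : lines.dropWhile pNC with
  | nil => simp [hdw, hdwmap, aFinish, bSegments]
  | cons r tail =>
    have hr : pNC r = false := by
      have := List.head_dropWhile_not (p := pNC) (l := lines)
        (by rw [hdw]; simp)
      simpa [hdw] using this
    have hrc : bIsCall (PySem.Str.strip r) = true := by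
      simpa [pNC] using hr
    rw [List.foldl_cons, aStep_call _ _ _ _ hrc]
    rw [mainFold tail.length tail (le_refl _)]
    show _ = bSegments ((lines.map PySem.Str.strip).dropWhile (fun s => !bIsCall s))
    rw [hdwmap, hdw, bSeg_cons]
    simp
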